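-- pv_equiv track=rewrite | github.com/Vascoengif/University-Projects | Aprendizagem Automática/Trabalho 1/main.py | auxiliar_validation_funtion
-- ===== SOURCE A (Python) =====
-- def auxiliar_validation_funtion(index_i, index_k, zdata):
-- 	validation = []
-- 	for zlinha_validacao in zdata:
-- 		index_j = 0
-- 		index_i += 1
-- 		aux_validation = []
-- 		validation.append(validation_funtion(index_i, index_j, index_k, zdata, aux_validation))
-- 	return validation
--
-- def validation_funtion(i, j, k, zdata, array):
--
-- 	if zdata[j-1] == zdata[-1] and j != 0:
-- 		return array
--
-- 	elif zdata[i] != zdata[j]: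
-- 		if zdata[i][k] == zdata[i][-1]:
-- 			return array
-- 		elif zdata[i][k] == zdata[j][k]:
-- 			if zdata[i][-1] == zdata[j][-1]:
-- 				array.append(True)
-- 			else:
-- 				array.append(False)
-- 	j += 1
--
-- 	return validation_funtion(i, j, k, zdata, array)
-- ===== SOURCE B (Python) =====
-- def auxiliar_validation_funtion(index_i, index_k, zdata):
--     # Iterative re-implementation: the recursive helper's stopping point (the first
--     # j>=1 with zdata[j-1] == zdata[-1]) is the same for every row, so compute it once
--     # and run a plain bounded loop per row.
--     if not zdata:
--         return []
--     last = zdata[-1]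
--     stop = next(p for p, row in enumerate(zdata) if row == last) + 1
--     result = []
--     for r in range(len(zdata)):
--         row_i = zdata[index_i + 1 + r]
--         aux = []
--         for j in range(stop):
--             if row_i != zdata[j]:
--                 if row_i[index_k] == row_i[-1]:
--                     break
--                 if row_i[index_k] == zdata[j][index_k]:
--                     aux.append(row_i[-1] == zdata[j][-1])
--         result.append(aux)
--     return result
-- ===== Notes on version B (the rewrite author's own statement) =====
-- stated objective: simpler
-- what changed: Replaces the per-row unbounded recursion with a plain bounded loop: the recursive helper's stopping index (first j>=1 with zdata[j-1]==zdata[-1]) is the same for every row, so B computes it once and each row runs an iterative for-loop up to it with a break.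
-- outside the precondition, e.g. on auxiliar_validation_funtion(-1, 2, [[3, -3]]): A returns [[]], B returns [[]]
import Mathlib
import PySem

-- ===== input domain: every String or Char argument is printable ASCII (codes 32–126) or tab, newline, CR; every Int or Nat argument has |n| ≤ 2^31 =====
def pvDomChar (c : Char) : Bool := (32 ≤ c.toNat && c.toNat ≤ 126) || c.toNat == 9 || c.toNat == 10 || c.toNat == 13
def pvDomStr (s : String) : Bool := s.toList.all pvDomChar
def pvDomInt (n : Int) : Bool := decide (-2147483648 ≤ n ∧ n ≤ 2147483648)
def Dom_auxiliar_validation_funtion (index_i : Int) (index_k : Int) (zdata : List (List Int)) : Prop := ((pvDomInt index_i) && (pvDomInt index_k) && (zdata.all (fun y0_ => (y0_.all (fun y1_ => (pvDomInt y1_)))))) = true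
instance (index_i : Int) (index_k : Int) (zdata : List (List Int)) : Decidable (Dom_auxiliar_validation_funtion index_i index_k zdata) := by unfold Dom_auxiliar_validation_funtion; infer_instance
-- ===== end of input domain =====

-- B replaces A's per-row unbounded recursion by one shared, precomputed stopping index and a
-- plain bounded loop per row (simpler decomposition; same return values wherever A returns normally).

-- ===== PORT A =====
-- literal port of A's recursive helper validation_funtion; `none` marks an IndexError (or, at
-- fuel 0, a recursion that would have gone past j = len(zdata), which cannot happen with the
-- fuel auxiliar_validation_funtion passes)
def pvValFun (i j k : Int) (zdata : List (List Int)) (array : List Bool) : Nat → Option (List Bool)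
  | 0 => none
  | fuel+1 =>
    match PySem.List.pyGet? zdata (j-1), PySem.List.pyGet? zdata (-1) with
    | some a, some b =>
      if a = b ∧ j ≠ 0 then some array
      else
        match PySem.List.pyGet? zdata i, PySem.List.pyGet? zdata j with
        | some zi, some zj =>
          if zi ≠ zj then
            match PySem.List.pyGet? zi k, PySem.List.pyGet? zi (-1) with
            | some zik, some zil =>
              if zik = zil then some array
              else
                match PySem.List.pyGet? zj k with
                | some zjk =>
                  if zik = zjk then
                    match PySem.List.pyGet? zj (-1) with
                    | some zjl => pvValFun i (j+1) k zdata (array ++ [decide (zil = zjl)]) fuel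
                    | none => none
                  else pvValFun i (j+1) k zdata array fuel
                | none => none
            | _, _ => none
          else pvValFun i (j+1) k zdata array fuel
        | _, _ => none
    | _, _ => none

def auxiliar_validation_funtion (index_i : Int) (index_k : Int) (zdata : List (List Int)) : List (List Bool) :=
  (zdata.foldl
    (fun (st : Int × List (List Bool)) _ =>
      let i := st.1 + 1
      (i, st.2 ++ [(pvValFun i 0 index_k zdata [] (zdata.length + 1)).getD []]))
    (index_i, ([] : List (List Bool)))).2

-- ===== PORT B =====
-- literal port of Source B's inner for-loop over range(stop) with its break and early exits
def pvBLoop (row : List Int) (k : Int) (zdata : List (List Int)) : List Nat → List Bool → List Bool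
  | [], acc => acc
  | j :: rest, acc =>
    match PySem.List.pyGet? zdata (j : Int) with
    | none => acc
    | some zj =>
      if row ≠ zj then
        match PySem.List.pyGet? row k, PySem.List.pyGet? row (-1) with
        | some rk, some rl =>
          if rk = rl then acc
          else
            match PySem.List.pyGet? zj k with
            | some zjk =>
              if rk = zjk then
                match PySem.List.pyGet? zj (-1) with
                | some zjl => pvBLoop row k zdata rest (acc ++ [decide (rl = zjl)])
                | none => acc
              else pvBLoop row k zdata rest acc
            | none => acc
        | _, _ => acc
      else pvBLoop row k zdata rest acc

def auxiliar_validation_funtion_alt (index_i : Int) (index_k : Int) (zdata : List (List Int)) : List (List Bool) :=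
  if zdata = [] then []
  else
    let last := (PySem.List.pyGet? zdata (-1)).getD []
    let stop := zdata.findIdx (fun r => r == last) + 1
    (List.range zdata.length).map (fun (r : Nat) =>
      match PySem.List.pyGet? zdata (index_i + 1 + (r : Int)) with
      | some row => pvBLoop row index_k zdata (List.range stop) []
      | none => [])

-- ===== PRECONDITION & SPEC =====
-- Pre_ = no access of A raises an IndexError: every row index the outer loop reaches and the
-- column index index_k are in range, and rows are nonempty. This is slightly narrower than
-- "A returns": when all compared rows are equal A never indexes into a row, so it also returns
-- with index_k out of range or empty rows (B returns the same value on those inputs).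
def Pre_auxiliar_validation_funtion (index_i : Int) (index_k : Int) (zdata : List (List Int)) : Prop :=
  zdata = [] ∨
  ((∀ row ∈ zdata, row ≠ [] ∧ -(row.length : Int) ≤ index_k ∧ index_k < row.length)
    ∧ -(zdata.length : Int) - 1 ≤ index_i ∧ index_i ≤ -1)
instance (index_i : Int) (index_k : Int) (zdata : List (List Int)) : Decidable (Pre_auxiliar_validation_funtion index_i index_k zdata) := by
  unfold Pre_auxiliar_validation_funtion; infer_instance

def pvWitness_auxiliar_validation_funtion : Int × Int × List (List Int) := (-2, 0, [[1, 2], [3, 4]])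

def Spec_auxiliar_validation_funtion (index_i : Int) (index_k : Int) (zdata : List (List Int)) (out : List (List Bool)) : Prop := out = auxiliar_validation_funtion_alt index_i index_k zdata
instance (index_i : Int) (index_k : Int) (zdata : List (List Int)) (out : List (List Bool)) : Decidable (Spec_auxiliar_validation_funtion index_i index_k zdata out) := by unfold Spec_auxiliar_validation_funtion; infer_instance

-- ===== CLAIM (what is proved, stated in full; the proofs are below) =====
def Claim_equal_auxiliar_validation_funtion : Prop := ∀ (index_i : Int) (index_k : Int) (zdata : List (List Int)), Dom_auxiliar_validation_funtion index_i index_k zdata → Pre_auxiliar_validation_funtion index_i index_k zdata → Spec_auxiliar_validation_funtion index_i index_k zdata (auxiliar_validation_funtion index_i index_k zdata)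

-- ===== LEMMAS AND PROOFS =====

-- inside Pre_, every element access into a row of zdata succeeds
theorem pv_row_some (zdata : List (List Int)) (k : Int) (r : List Int) (hr : r ∈ zdata)
    (hrows : ∀ row ∈ zdata, row ≠ [] ∧ -(row.length : Int) ≤ k ∧ k < row.length) :
    (∃ v, PySem.List.pyGet? r k = some v) ∧ (∃ w, PySem.List.pyGet? r (-1) = some w) := by
  obtain ⟨hne, hk1, hk2⟩ := hrows r hr
  constructor
  · rcases h : PySem.List.pyGet? r k with _ | v
    · rw [PySem.List.pyGet?_eq_none_iff] at h
      exact absurd (by constructor <;> omega : PySem.Raise.InRange r.length k) h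
    · exact ⟨v, rfl⟩
  · rw [PySem.List.pyGet?_neg_one]
    rcases h : r.getLast? with _ | w
    · exact absurd (List.getLast?_eq_none_iff.mp h) hne
    · exact ⟨w, rfl⟩

-- one row: A's recursion from j equals B's loop over the remaining indices, for the common
-- stopping point f + 1 (f = first index whose row equals the last row)
theorem pv_loop_eq (k : Int) (zdata : List (List Int)) (last : List Int) (f : Nat)
    (hrows : ∀ row ∈ zdata, row ≠ [] ∧ -(row.length : Int) ≤ k ∧ k < row.length)
    (hlast : PySem.List.pyGet? zdata (-1) = some last)
    (hf : f < zdata.length)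
    (hfeq : zdata[f] = last)
    (hfirst : ∀ p (hp : p < f), zdata[p]'(by omega) ≠ last)
    (i : Int) (row : List Int) (hi : PySem.List.pyGet? zdata i = some row) :
    ∀ (n j : Nat) (acc : List Bool) (fuel : Nat), j + n = f + 1 → n < fuel →
      pvValFun i (j : Int) k zdata acc fuel = some (pvBLoop row k zdata (List.range' j n) acc) := by
  intro n
  induction n with
  | zero =>
    intro j acc fuel hj hfuel
    obtain ⟨fuel, rfl⟩ : ∃ m, fuel = m + 1 := ⟨fuel - 1, by omega⟩
    have hj' : j = f + 1 := by omega
    subst hj'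
    have hget : PySem.List.pyGet? zdata ((f : Int) + 1 - 1) = some last := by
      have : ((f : Int) + 1 - 1) = (f : Int) := by ring
      rw [this, PySem.List.pyGet?_natCast, List.getElem?_eq_getElem hf, hfeq]
    simp only [pvValFun, List.range'_zero, pvBLoop]
    push_cast
    rw [hget, hlast]
    simp only [true_and]
    rw [if_pos (show ((f : Int) + 1) ≠ 0 by omega)]
  | succ n ih =>
    intro j acc fuel hj hfuel
    obtain ⟨fuel, rfl⟩ : ∃ m, fuel = m + 1 := ⟨fuel - 1, by omega⟩
    have hjf : j ≤ f := by omega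
    have hguard : ∀ a, PySem.List.pyGet? zdata ((j : Int) - 1) = some a → ¬(a = last ∧ (j : Int) ≠ 0) := by
      intro a ha
      rcases Nat.eq_zero_or_pos j with hj0 | hj0
      · subst hj0; rintro ⟨_, h0⟩; exact h0 (by norm_num)
      · have hlt : j - 1 < f := by omega
        have : PySem.List.pyGet? zdata ((j : Int) - 1) = some (zdata[j-1]'(by omega)) := by
          have : ((j : Int) - 1) = ((j - 1 : Nat) : Int) := by omega
          rw [this, PySem.List.pyGet?_natCast, List.getElem?_eq_getElem (by omega)]
        rw [this] at ha
        rintro ⟨he, _⟩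
        exact hfirst (j-1) hlt (by injection ha with h; rw [h]; exact he)
    have hj1 : PySem.List.pyGet? zdata (j : Int) = some (zdata[j]'(by omega)) := by
      rw [PySem.List.pyGet?_natCast, List.getElem?_eq_getElem (by omega)]
    set zj := zdata[j]'(by omega) with hzj
    have hzjmem : zj ∈ zdata := by rw [hzj]; exact List.getElem_mem _
    have hrowmem : row ∈ zdata := PySem.List.mem_of_pyGet?_eq_some zdata hi
    obtain ⟨a, hga⟩ : ∃ a, PySem.List.pyGet? zdata ((j : Int) - 1) = some a := by
      rcases Nat.eq_zero_or_pos j with h0 | h0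
      · subst h0; exact ⟨last, by norm_num [hlast]⟩
      · refine ⟨zdata[j-1]'(by omega), ?_⟩
        rw [show ((j : Int) - 1) = ((j - 1 : Nat) : Int) by omega, PySem.List.pyGet?_natCast,
          List.getElem?_eq_getElem (by omega)]
    have hcast : (j : Int) + 1 = ((j + 1 : Nat) : Int) := by push_cast; ring
    have hrec := fun acc' => ih (j+1) acc' fuel (by omega) (by omega)
    rw [List.range'_succ]
    simp only [pvValFun, pvBLoop, hga, hlast, hi, hj1]
    rw [if_neg (hguard a hga)]
    by_cases hrz : row = zj
    · rw [if_neg (by simpa using hrz), if_neg (by simpa using hrz), hcast, hrec acc]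
    · rw [if_pos (by simpa using hrz), if_pos (by simpa using hrz)]
      obtain ⟨⟨rk, hrk⟩, ⟨rl, hrl⟩⟩ := pv_row_some zdata k row hrowmem hrows
      obtain ⟨⟨zjk, hzjk⟩, ⟨zjl, hzjl⟩⟩ := pv_row_some zdata k zj hzjmem hrows
      simp only [hrk, hrl, hzjk, hzjl]
      by_cases h1 : rk = rl
      · rw [if_pos h1, if_pos h1]
      · rw [if_neg h1, if_neg h1]
        by_cases h2 : rk = zjk
        · rw [if_pos h2, if_pos h2, hcast, hrec (acc ++ [decide (rl = zjl)])]
        · rw [if_neg h2, if_neg h2, hcast, hrec acc]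

-- A's outer foldl produces one entry per row at consecutive indices index_i+1, index_i+2, …
theorem pv_fold_shape (g : Int → List Bool) :
    ∀ (l : List (List Int)) (i0 : Int) (acc : List (List Bool)),
      (l.foldl (fun (st : Int × List (List Bool)) _ => (st.1 + 1, st.2 ++ [g (st.1 + 1)])) (i0, acc)).2
        = acc ++ (List.range l.length).map (fun (r : Nat) => g (i0 + 1 + (r : Int))) := by
  intro l
  induction l with
  | nil => intro i0 acc; simp
  | cons x t ih =>
    intro i0 acc
    rw [List.foldl_cons, ih]
    rw [List.length_cons, List.range_succ_eq_map, List.map_cons, List.map_map, List.append_assoc, List.singleton_append]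
    congr 1
    congr 1
    · norm_num
    · apply List.map_congr_left
      intro r _
      simp only [Function.comp_apply]
      push_cast
      ring_nf

-- ===== VERDICT (by name: the statement is the Claim_ definition above) =====
theorem auxiliar_validation_funtion_spec : Claim_equal_auxiliar_validation_funtion := by
  intro index_i index_k zdata _ hpre
  unfold Spec_auxiliar_validation_funtion
  rcases hpre with hnil | ⟨hrows, hi1, hi2⟩
  · subst hnil
    simp [auxiliar_validation_funtion, auxiliar_validation_funtion_alt]
  by_cases hnil : zdata = []
  · subst hnil
    simp [auxiliar_validation_funtion, auxiliar_validation_funtion_alt]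
  -- the last row and the common stopping point
  have hlast : PySem.List.pyGet? zdata (-1) = some (zdata.getLast hnil) := by
    rw [PySem.List.pyGet?_neg_one]; exact List.getLast?_eq_some_getLast hnil
  set last := zdata.getLast hnil with hlastdef
  set f := zdata.findIdx (fun r => r == last) with hfdef
  have hf : f < zdata.length :=
    List.findIdx_lt_length_of_exists ⟨last, List.getLast_mem hnil, by simp⟩
  have hfeq : zdata[f] = last := by
    have := @List.findIdx_getElem _ (fun r => r == last) zdata
      (show List.findIdx (fun r => r == last) zdata < zdata.length from hf)
    simpa using this
  have hfirst : ∀ p (hp : p < f), zdata[p]'(by omega) ≠ last := by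
    intro p hp
    have := List.not_of_lt_findIdx (p := fun r => r == last)
      (show p < List.findIdx (fun r => r == last) zdata from hp)
    simpa using this
  -- unfold B's port
  rw [auxiliar_validation_funtion_alt]
  rw [if_neg hnil]
  simp only [hlast, Option.getD_some]
  -- unfold A's port to a map over row numbers
  rw [auxiliar_validation_funtion,
    pv_fold_shape (fun i => (pvValFun i 0 index_k zdata [] (zdata.length + 1)).getD [])]
  rw [List.nil_append]
  apply List.map_congr_left
  intro r hr
  have hrlt : r < zdata.length := List.mem_range.mp hr
  -- the row index is in range
  have hrow : ∃ row, PySem.List.pyGet? zdata (index_i + 1 + (r : Int)) = some row := by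
    rcases h : PySem.List.pyGet? zdata (index_i + 1 + (r : Int)) with _ | row
    · rw [PySem.List.pyGet?_eq_none_iff] at h
      exact absurd (by constructor <;> omega : PySem.Raise.InRange zdata.length (index_i + 1 + (r : Int))) h
    · exact ⟨row, rfl⟩
  obtain ⟨row, hrow⟩ := hrow
  rw [hrow]
  have := pv_loop_eq index_k zdata last f hrows hlast hf hfeq hfirst
    (index_i + 1 + (r : Int)) row hrow (f + 1) 0 [] (zdata.length + 1) (by omega) (by omega)
  simp only [Nat.cast_zero] at this
  rw [this, Option.getD_some, List.range_eq_range']
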